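-- pv_equiv track=rewrite | github.com/AlecWaichunas/DjangoQ-A | App/views.py | filter_profanity
-- ===== SOURCE A (Python) =====
-- def filter_profanity(words):
-- 	blocked_words = { 'fuck', 'rape', 'abuse', 'hell', 'shit', 'dick', 'faggot', 'fucker', 'cunt', 'nigger', 'nigga' , 'pussy', 'fucking', 'fucktard', 'shitbasket', 'assgoblin' }
-- 	for i in words:
-- 		individual = str(i).split( )
-- 		if i == None:
-- 			continue
-- 		for string in individual:
-- 			for blocked in blocked_words:
-- 				if string.lower() == blocked:
-- 					return True
-- 	return False
-- ===== SOURCE B (Python) =====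
-- def filter_profanity(words):
--     blocked = frozenset({'fuck', 'rape', 'abuse', 'hell', 'shit', 'dick', 'faggot', 'fucker', 'cunt', 'nigger', 'nigga', 'pussy', 'fucking', 'fucktard', 'shitbasket', 'assgoblin'})
--     for w in words:
--         cur = []
--         for ch in str(w) + ' ':
--             if ch.isspace():
--                 if cur and ''.join(cur) in blocked:
--                     return True
--                 cur = []
--             else:
--                 cur.append(ch.lower())
--     return False
-- ===== Notes on version B (the rewrite author's own statement) =====
-- stated objective: alternative
-- what changed: B drops tokenization entirely: instead of A's split-every-word then triple-nested token-vs-blocked equality scan, it streams over the characters of each word with a current-token buffer, lowercasing as it goes and testing the buffer against the blocked frozenset at each whitespace boundary with an early return.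
import Mathlib
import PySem

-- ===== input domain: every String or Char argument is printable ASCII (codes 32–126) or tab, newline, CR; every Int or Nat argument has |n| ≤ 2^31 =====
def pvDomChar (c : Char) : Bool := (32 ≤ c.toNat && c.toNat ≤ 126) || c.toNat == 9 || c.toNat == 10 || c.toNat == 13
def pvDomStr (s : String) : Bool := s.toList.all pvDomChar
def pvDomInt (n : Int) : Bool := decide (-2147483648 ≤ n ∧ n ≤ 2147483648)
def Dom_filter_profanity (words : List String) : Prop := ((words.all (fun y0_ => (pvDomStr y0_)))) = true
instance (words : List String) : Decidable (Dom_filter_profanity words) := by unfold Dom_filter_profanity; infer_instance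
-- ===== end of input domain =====

-- B replaces A's tokenize-then-compare nesting (split every word, compare each token against
-- each blocked word) by a character-level streaming scanner: one pass over the characters,
-- lowercasing into a current-token buffer and checking the buffer against the blocked set at
-- each whitespace boundary (objective: alternative; return value only).

-- ===== PORT A =====
-- the set literal of blocked words; A iterates it testing equality token-by-token
def pvBlockedA : PySem.Set String := PySem.Set.ofList
  ["fuck","rape","abuse","hell","shit","dick","faggot","fucker","cunt","nigger","nigga","pussy","fucking","fucktard","shitbasket","assgoblin"]

-- for i in words: individual = str(i).split(); (the 'if i == None: continue' guard never
-- fires on strings); nested loops with early 'return True' = List.any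
def filter_profanity (words : List String) : Bool :=
  words.any (fun i =>
    (PySem.Str.split₀ i).any (fun s =>
      pvBlockedA.any (fun blocked => PySem.Str.lower s == blocked)))

-- ===== PORT B =====
-- the frozenset literal ('x in blocked' = membership)
def pvBlockedB : List String :=
  ["fuck","rape","abuse","hell","shit","dick","faggot","fucker","cunt","nigger","nigga","pussy","fucking","fucktard","shitbasket","assgoblin"]

-- inner character loop 'for ch in str(w) + " "': cur holds the lowercased characters of the
-- current token in order; at whitespace, 'if cur and "".join(cur) in blocked: return True'
def pvScanB : List Char → List Char → Bool
  | [], _ => false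
  | c :: rest, cur =>
    if PySem.Chars.isspace c then
      (if cur.isEmpty = false && pvBlockedB.contains (String.ofList cur) then true
       else pvScanB rest [])
    else pvScanB rest (cur ++ [PySem.Chars.lowerChar c])

def filter_profanity_alt (words : List String) : Bool :=
  words.any (fun w => pvScanB (w.toList ++ [' ']) [])

-- ===== PRECONDITION & SPEC =====
def Spec_filter_profanity (words : List String) (out : Bool) : Prop := out = filter_profanity_alt words
instance (words : List String) (out : Bool) : Decidable (Spec_filter_profanity words out) := by unfold Spec_filter_profanity; infer_instance

-- ===== CLAIM (what is proved, stated in full; the proofs are below) =====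
def Claim_equal_filter_profanity : Prop := ∀ (words : List String), Dom_filter_profanity words → Spec_filter_profanity words (filter_profanity words)

-- ===== LEMMAS AND PROOFS =====

-- "this token (in order) is blocked", the predicate both sides decide per token
def pvHit (t : List Char) : Bool := pvBlockedB.contains (String.ofList (PySem.Chars.lower t))

-- invariant connecting split₀'s worker with B's scanner: curR is the reversed current buffer,
-- acc the already-emitted tokens
theorem pvScan_go (cs : List Char) (curR : List Char) (acc : List (List Char)) :
    (PySem.Chars.split₀.go cs curR acc).any pvHit
      = (acc.any pvHit || pvScanB (cs ++ [' ']) (PySem.Chars.lower curR.reverse)) := by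
  induction cs generalizing curR acc with
  | nil =>
      rw [PySem.Chars.split₀.go]
      by_cases he : curR.isEmpty = true
      · have hc : curR = [] := by simpa using he
        subst hc
        simp [pvScanB, PySem.Chars.lower]
      · have hne : curR ≠ [] := by simpa using he
        have hl : PySem.Chars.lower curR.reverse ≠ [] := by
          simp [PySem.Chars.lower, hne]
        by_cases hd : String.ofList (PySem.Chars.lower curR.reverse) ∈ pvBlockedB
        · simp [he, hl, hd, pvScanB, pvHit, show PySem.Chars.isspace ' ' = true from by decide]
        · simp [he, hl, hd, pvScanB, pvHit, show PySem.Chars.isspace ' ' = true from by decide]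
  | cons c rest ih =>
      rw [PySem.Chars.split₀.go]
      by_cases hsp : PySem.Chars.isspace c = true
      · by_cases he : curR.isEmpty = true
        · have hc : curR = [] := by simpa using he
          subst hc
          simp [hsp, ih, pvScanB, PySem.Chars.lower]
        · have hne : curR ≠ [] := by simpa using he
          rw [if_pos hsp, if_neg he, ih]
          by_cases hd : String.ofList ((List.map PySem.Chars.lowerChar curR).reverse) ∈ pvBlockedB <;>
            simp [hsp, hne, hd, pvScanB, pvHit, PySem.Chars.lower, Bool.or_comm]
      · simp only [Bool.not_eq_true] at hsp
        rw [if_neg (by simp [hsp]), ih]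
        simp [hsp, pvScanB, PySem.Chars.lower]

-- per word: A's token scan equals B's character scan
theorem pvWord_eq (w : String) :
    (PySem.Str.split₀ w).any (fun s => pvBlockedA.any (fun blocked => PySem.Str.lower s == blocked))
      = pvScanB (w.toList ++ [' ']) [] := by
  have h := pvScan_go w.toList [] []
  simp only [List.any_nil, Bool.false_or, List.reverse_nil] at h
  rw [show PySem.Chars.split₀.go w.toList [] [] = PySem.Chars.split₀ w.toList from rfl,
      show PySem.Chars.lower ([] : List Char) = [] from rfl] at h
  rw [← h, PySem.Str.split₀, List.any_map]
  congr 1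
  funext t
  show pvBlockedA.any (fun blocked => PySem.Str.lower (String.ofList t) == blocked) = pvHit t
  rw [Bool.eq_iff_iff]
  simp only [List.any_eq_true, beq_iff_eq, pvHit, List.contains_iff_mem,
    pvBlockedA, PySem.Set.mem_ofList]
  have hlow : PySem.Str.lower (String.ofList t) = String.ofList (PySem.Chars.lower t) := by
    simp [PySem.Str.lower]
  constructor
  · rintro ⟨b, hb, hlb⟩
    rw [hlow] at hlb
    exact hlb ▸ hb
  · intro hmem
    exact ⟨String.ofList (PySem.Chars.lower t), hmem, hlow⟩

-- ===== VERDICT (by name: the statement is the Claim_ definition above) =====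
theorem filter_profanity_spec : Claim_equal_filter_profanity := by
  intro words _
  unfold Spec_filter_profanity filter_profanity filter_profanity_alt
  simp only [pvWord_eq]
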